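-- pv_equiv track=rewrite | github.com/Bauti3230/TdaBuchwaldRpl | ProgramacionDinamica/schedulingConPesos.py | posicion_no_conflictiva
-- ===== SOURCE A (Python) =====
-- def posicion_no_conflictiva(charlas, posicion):
--     inicio, fin = 0, posicion - 1
--
--     while inicio <= fin:
--         mid = (inicio + fin) // 2
--         if charlas[mid][1] <= charlas[posicion][0]:
--             if mid + 1 < len(charlas) and charlas[mid + 1][1] <= charlas[posicion][0]:
--                 inicio = mid + 1
--             else:
--                 return mid
--         else:
--             fin = mid - 1
--     return -1
-- ===== SOURCE B (Python) =====
-- def posicion_no_conflictiva(charlas, posicion):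
--     if posicion <= 0:
--         return -1
--     target = charlas[posicion][0]
--     ultimo = -1
--     for i in range(posicion):
--         if charlas[i][1] <= target:
--             ultimo = i
--     return ultimo
-- ===== Notes on version B (the rewrite author's own statement) =====
-- stated objective: simpler
-- what changed: Replaces the hand-written binary search with a plain linear scan over the talks before posicion, returning the last index whose end time is at most charlas[posicion][0]; Pre_ excludes posicion >= len(charlas) (A raises IndexError) and lists where the talks ending by the target do not form a prefix (unsorted input, where A's bisection value is accidental).
-- intended difference: On inputs where the selected talk is degenerate (charlas[posicion][1] <= charlas[posicion][0], its end no later than its start), A returns -1 even though the preceding talk does not conflict, while B returns posicion-1, the last genuinely non-conflicting talk, which is the intended answer. — e.g. on posicion_no_conflictiva([(0, 1), (2, 2)], 1): A returns -1, B returns 0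
-- outside the precondition, e.g. on posicion_no_conflictiva([(0, 5), (0, 1), (1, 9)], 2): A returns -1, B returns 1
import Mathlib
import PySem

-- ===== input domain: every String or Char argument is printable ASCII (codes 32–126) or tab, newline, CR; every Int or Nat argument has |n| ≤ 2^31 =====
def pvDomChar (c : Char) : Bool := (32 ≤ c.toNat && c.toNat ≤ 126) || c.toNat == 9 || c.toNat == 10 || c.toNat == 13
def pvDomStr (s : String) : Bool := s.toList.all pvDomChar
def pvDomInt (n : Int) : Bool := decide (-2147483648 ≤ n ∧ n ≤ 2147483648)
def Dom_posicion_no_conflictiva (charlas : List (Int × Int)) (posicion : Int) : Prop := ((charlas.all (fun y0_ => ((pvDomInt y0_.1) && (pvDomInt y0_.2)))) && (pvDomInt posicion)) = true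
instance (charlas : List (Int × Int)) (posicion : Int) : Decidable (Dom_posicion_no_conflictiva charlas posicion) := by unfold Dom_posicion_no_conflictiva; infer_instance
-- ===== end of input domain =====

-- B replaces A's hand-written binary search with a plain linear scan over the talks
-- before posicion; objective: simpler. On degenerate selected talks (end ≤ start)
-- the two values differ (D_ below); B's is the intended one.


-- ===== PORT A =====
-- A's while-loop: binary search on [inicio, fin]; the `none` arms model an
-- IndexError (unreachable under Pre_).
def pvALoop (charlas : List (Int × Int)) (posicion : Int) (inicio fin : Int) : Int :=
  if h : inicio ≤ fin then
    -- mid = (inicio + fin) // 2, inlined at each use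
    match PySem.List.pyGet? charlas (PySem.Int.floordiv (inicio + fin) 2) with
    | none => 0
    | some cm =>
      match PySem.List.pyGet? charlas posicion with
      | none => 0
      | some cp =>
        if cm.2 ≤ cp.1 then
          if (decide (PySem.Int.floordiv (inicio + fin) 2 + 1 < (charlas.length : Int)) &&
              (match PySem.List.pyGet? charlas (PySem.Int.floordiv (inicio + fin) 2 + 1) with
               | some cm1 => decide (cm1.2 ≤ cp.1)
               | none => false)) then
            pvALoop charlas posicion (PySem.Int.floordiv (inicio + fin) 2 + 1) fin
          else PySem.Int.floordiv (inicio + fin) 2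
        else pvALoop charlas posicion inicio (PySem.Int.floordiv (inicio + fin) 2 - 1)
  else -1
termination_by (fin + 1 - inicio).toNat
decreasing_by
  · have := PySem.Int.floordiv_two_mid_bounds h; omega
  · have := PySem.Int.floordiv_two_mid_bounds h; omega

def posicion_no_conflictiva (charlas : List (Int × Int)) (posicion : Int) : Int :=
  pvALoop charlas posicion 0 (posicion - 1)

-- ===== PORT B =====
def posicion_no_conflictiva_alt (charlas : List (Int × Int)) (posicion : Int) : Int :=
  if posicion ≤ 0 then -1
  else
    match PySem.List.pyGet? charlas posicion with
    | none => 0  -- IndexError (unreachable under Pre_)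
    | some cp =>
      -- for i in range(posicion): charlas[i][1] ... (i < posicion < len, so in range)
      (PySem.List.pyRange 0 posicion 1).foldl
        (fun ultimo i =>
          if (PySem.List.pyGetD charlas i (0, 0)).2 ≤ cp.1 then i else ultimo) (-1)

-- ===== PRECONDITION & SPEC =====
-- For 1 ≤ posicion, Pre_ excludes (a) posicion ≥ len(charlas), where A raises
-- IndexError, and (b) lists in which the talks ending by charlas[posicion][0] do
-- not form a prefix (guaranteed when talks are sorted by end time, the intended
-- input of this weighted-interval-scheduling helper): there A's binary-search
-- value is an accident of the bisection path.
def Pre_posicion_no_conflictiva (charlas : List (Int × Int)) (posicion : Int) : Prop :=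
  posicion ≤ 0 ∨
    (posicion < (charlas.length : Int) ∧
      ∀ i : Fin charlas.length, ∀ j : Fin charlas.length, (i : Nat) ≤ (j : Nat) →
        charlas[(j : Nat)].2 ≤ (PySem.List.pyGetD charlas posicion (0, 0)).1 →
        charlas[(i : Nat)].2 ≤ (PySem.List.pyGetD charlas posicion (0, 0)).1)
instance (charlas : List (Int × Int)) (posicion : Int) : Decidable (Pre_posicion_no_conflictiva charlas posicion) := by unfold Pre_posicion_no_conflictiva; infer_instance

def pvWitness_posicion_no_conflictiva : (List (Int × Int)) × Int := ([(0, 1), (2, 3)], 1)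

-- On inputs where the selected talk is degenerate (charlas[posicion][1] ≤
-- charlas[posicion][0]), A returns -1 even though the preceding talk does not
-- conflict, while B returns posicion-1, the intended last non-conflicting talk.
def D_posicion_no_conflictiva (charlas : List (Int × Int)) (posicion : Int) : Prop :=
  1 ≤ posicion ∧ posicion < (charlas.length : Int) ∧
    (charlas.getD posicion.toNat (0, 0)).2 ≤ (charlas.getD posicion.toNat (0, 0)).1
instance (charlas : List (Int × Int)) (posicion : Int) : Decidable (D_posicion_no_conflictiva charlas posicion) := by unfold D_posicion_no_conflictiva; infer_instance

def Spec_posicion_no_conflictiva (charlas : List (Int × Int)) (posicion : Int) (out : Int) : Prop := ¬ D_posicion_no_conflictiva charlas posicion → out = posicion_no_conflictiva_alt charlas posicion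
instance (charlas : List (Int × Int)) (posicion : Int) (out : Int) : Decidable (Spec_posicion_no_conflictiva charlas posicion out) := by unfold Spec_posicion_no_conflictiva; infer_instance

def pvDiffWitness_posicion_no_conflictiva : (List (Int × Int)) × Int := ([(0, 1), (2, 2)], 1)
def pvDiffWitnessOut_posicion_no_conflictiva : Int × Int := (-1, 0)

-- ===== CLAIM (what is proved, stated in full; the proofs are below) =====
def Claim_unchanged_posicion_no_conflictiva : Prop := ∀ (charlas : List (Int × Int)) (posicion : Int), Dom_posicion_no_conflictiva charlas posicion → Pre_posicion_no_conflictiva charlas posicion → Spec_posicion_no_conflictiva charlas posicion (posicion_no_conflictiva charlas posicion)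
def Claim_changed_posicion_no_conflictiva : Prop := Dom_posicion_no_conflictiva (pvDiffWitness_posicion_no_conflictiva.1) (pvDiffWitness_posicion_no_conflictiva.2) ∧ Pre_posicion_no_conflictiva (pvDiffWitness_posicion_no_conflictiva.1) (pvDiffWitness_posicion_no_conflictiva.2) ∧ D_posicion_no_conflictiva (pvDiffWitness_posicion_no_conflictiva.1) (pvDiffWitness_posicion_no_conflictiva.2) ∧ posicion_no_conflictiva (pvDiffWitness_posicion_no_conflictiva.1) (pvDiffWitness_posicion_no_conflictiva.2) = pvDiffWitnessOut_posicion_no_conflictiva.1 ∧ posicion_no_conflictiva_alt (pvDiffWitness_posicion_no_conflictiva.1) (pvDiffWitness_posicion_no_conflictiva.2) = pvDiffWitnessOut_posicion_no_conflictiva.2 ∧ pvDiffWitnessOut_posicion_no_conflictiva.1 ≠ pvDiffWitnessOut_posicion_no_conflictiva.2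
def Claim_exact_posicion_no_conflictiva : Prop := ∀ (charlas : List (Int × Int)) (posicion : Int), Dom_posicion_no_conflictiva charlas posicion → Pre_posicion_no_conflictiva charlas posicion → D_posicion_no_conflictiva charlas posicion → posicion_no_conflictiva charlas posicion ≠ posicion_no_conflictiva_alt charlas posicion

-- ===== LEMMAS AND PROOFS =====

-- Under the prefix property, a boundary K exists: an index qualifies iff it is ≤ K.
theorem pv_exists_K (t : Int) :
    ∀ (l : List (Int × Int)),
      (∀ (i j : Nat) (hi : i < l.length) (hj : j < l.length), i ≤ j →
        l[j].2 ≤ t → l[i].2 ≤ t) →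
      ∃ K : Int, -1 ≤ K ∧ K < (l.length : Int) ∧
        ∀ (i : Nat) (h : i < l.length), (l[i].2 ≤ t ↔ (i : Int) ≤ K) := by
  intro l
  induction l using List.reverseRecOn with
  | nil => intro _; exact ⟨-1, by norm_num, by simp, by intro i h; simp at h⟩
  | append_singleton l x ih =>
    intro hpre
    by_cases hx : x.2 ≤ t
    · refine ⟨(l.length : Int), by omega, by simp, ?_⟩
      intro i h
      simp only [List.length_append, List.length_singleton] at h
      constructor
      · intro _; omega
      · intro _
        have hli : (l ++ [x]).length = l.length + 1 := by simp
        have hxl : (l ++ [x])[l.length]'(by omega) = x := by simp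
        exact hpre i l.length (by omega) (by omega) (by omega) (by rw [hxl]; exact hx)
    · obtain ⟨K, hK1, hK2, hc⟩ := ih (by
        intro i j hi hj hij hjt
        have := hpre i j (by simp; omega) (by simp; omega) hij
          (by rwa [List.getElem_append_left hj])
        rwa [List.getElem_append_left hi] at this)
      refine ⟨K, hK1, by simp; omega, ?_⟩
      intro i h
      rcases Nat.lt_or_ge i l.length with hlt | hge
      · rw [List.getElem_append_left hlt]; exact hc i hlt
      · have : i = l.length := by simp at h; omega
        subst this
        have hxl : (l ++ [x])[l.length]'h = x := by simp
        rw [hxl]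
        constructor
        · intro hh; exact absurd hh hx
        · intro hh; omega

-- B's linear scan over range(n) computes the clamp of K to n-1 (or -1).
theorem pv_range_fold (charlas : List (Int × Int)) (t K : Int)
    (hK1 : -1 ≤ K)
    (hc : ∀ (i : Nat) (h : i < charlas.length), (charlas[i].2 ≤ t ↔ (i : Int) ≤ K)) :
    ∀ (n : Nat), n ≤ charlas.length →
      (PySem.List.pyRange 0 (n : Int) 1).foldl
        (fun ultimo i =>
          if (PySem.List.pyGetD charlas i (0, 0)).2 ≤ t then i else ultimo) (-1)
        = if (n : Int) ≤ K then (n : Int) - 1 else K := by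
  intro n
  induction n with
  | zero =>
    intro _
    rw [PySem.List.pyRange_one_eq_nil (by norm_num)]
    simp only [List.foldl_nil]
    split_ifs with h <;> omega
  | succ n ih =>
    intro hn
    have hcast : ((n : Int) + 1) = ((n + 1 : Nat) : Int) := by push_cast; ring
    rw [← hcast, PySem.List.pyRange_one_succ_right (by positivity), List.foldl_append,
      ih (by omega)]
    simp only [List.foldl_cons, List.foldl_nil]
    have hlt : n < charlas.length := by omega
    have hget : PySem.List.pyGetD charlas (n : Int) (0, 0) = charlas[n] :=
      PySem.List.pyGetD_eq_getElem charlas (0, 0) (by positivity) (by exact_mod_cast hlt)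
    rw [hget]
    have hcn := hc n hlt
    by_cases hq : charlas[n].2 ≤ t
    · have : (n : Int) ≤ K := hcn.mp hq
      simp only [hq, if_true]
      split_ifs with g <;> omega
    · have : ¬ (n : Int) ≤ K := fun hh => hq (hcn.mpr hh)
      simp only [hq, if_false]
      split_ifs <;> omega

-- Characterisation of A's binary-search loop given the boundary K.
theorem pv_loop_spec (charlas : List (Int × Int)) (posicion : Int) (cp : Int × Int) (K : Int)
    (hlen : posicion < (charlas.length : Int))
    (hcp : PySem.List.pyGet? charlas posicion = some cp)
    (hK1 : -1 ≤ K) (hK2 : K < (charlas.length : Int))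
    (hc : ∀ (i : Nat) (h : i < charlas.length), (charlas[i].2 ≤ cp.1 ↔ (i : Int) ≤ K)) :
    ∀ (n : Nat) (inicio fin : Int), (fin + 1 - inicio).toNat ≤ n →
      0 ≤ inicio → fin ≤ posicion - 1 → inicio - 1 ≤ K → (fin < K → posicion ≤ K) →
      pvALoop charlas posicion inicio fin = if inicio ≤ K ∧ K ≤ fin then K else -1 := by
  intro n
  induction n with
  | zero =>
    intro inicio fin hn h0 h1 h2 h3
    have hif : ¬ inicio ≤ fin := by omega
    rw [pvALoop, dif_neg hif]
    have hni : ¬ (inicio ≤ K ∧ K ≤ fin) := by omega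
    simp [hni]
  | succ n ih =>
    intro inicio fin hn h0 h1 h2 h3
    by_cases hif : inicio ≤ fin
    · rw [pvALoop, dif_pos hif]
      have hb1 := (PySem.Int.floordiv_two_mid_bounds hif).1
      have hb2 := (PySem.Int.floordiv_two_mid_bounds hif).2
      generalize hmideq : PySem.Int.floordiv (inicio + fin) 2 = mid at hb1 hb2 ⊢
      have hmnn : (0:Int) ≤ mid := by omega
      have hmlt : mid < (charlas.length : Int) := by omega
      have hgm := PySem.List.pyGet?_eq_some_getElem (xs := charlas) hmnn hmlt
      rw [hgm, hcp]
      have hmcast : ((mid.toNat : Int)) = mid := by omega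
      have hmn : mid.toNat < charlas.length := by omega
      have hcm := hc mid.toNat hmn
      rw [hmcast] at hcm
      by_cases hcnd : (charlas[mid.toNat]'hmn).2 ≤ cp.1
      · have hKm : mid ≤ K := hcm.mp hcnd
        simp only [hcnd, if_pos]
        by_cases hm1 : mid + 1 < (charlas.length : Int)
        · have hgm1 := PySem.List.pyGet?_eq_some_getElem (xs := charlas) (i := mid + 1) (by omega) hm1
          rw [hgm1]
          have hm1cast : (((mid + 1).toNat : Int)) = mid + 1 := by omega
          have hm1n : (mid + 1).toNat < charlas.length := by omega
          have hcm1 := hc (mid + 1).toNat hm1n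
          rw [hm1cast] at hcm1
          by_cases hc1 : (charlas[(mid + 1).toNat]'hm1n).2 ≤ cp.1
          · have hK1' : mid + 1 ≤ K := hcm1.mp hc1
            simp only [hm1, hc1, decide_true, Bool.and_true, if_pos]
            rw [ih (mid + 1) fin (by omega) (by omega) h1 (by omega) h3]
            have e1 : (mid + 1 ≤ K ∧ K ≤ fin) ↔ (inicio ≤ K ∧ K ≤ fin) := by omega
            split_ifs with g1 g2 g2 <;> first | rfl | omega
          · have hKd : K ≤ mid := by
              by_contra hh
              exact hc1 (hcm1.mpr (by omega))
            have hKeq : mid = K := le_antisymm hKm hKd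
            simp only [hc1, decide_false, Bool.and_false, if_neg, Bool.false_eq_true, not_false_iff]
            have : inicio ≤ K ∧ K ≤ fin := by omega
            simp [this, hKeq]
        · have hKd : K ≤ mid := by omega
          have hKeq : mid = K := le_antisymm hKm hKd
          simp only [hm1, decide_false, Bool.false_and, if_neg, Bool.false_eq_true, not_false_iff]
          have : inicio ≤ K ∧ K ≤ fin := by omega
          simp [this, hKeq]
      · have hKm : K < mid := by
          by_contra hh
          exact hcnd (hcm.mpr (by omega))
        simp only [hcnd, if_neg, not_false_iff]
        rw [ih inicio (mid - 1) (by omega) h0 (by omega) h2 (by intro hlt; omega)]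
        split_ifs with g1 g2 g2 <;> first | rfl | omega
    · have hif' : ¬ inicio ≤ fin := hif
      rw [pvALoop, dif_neg hif']
      have hni : ¬ (inicio ≤ K ∧ K ≤ fin) := by omega
      simp [hni]

-- Shared skeleton: under Pre_ and 1 ≤ posicion < len, both ports expressed via K.
theorem pv_both_values (charlas : List (Int × Int)) (posicion : Int)
    (hp0 : ¬ posicion ≤ 0)
    (hlen : posicion < (charlas.length : Int))
    (hprefix : ∀ i : Fin charlas.length, ∀ j : Fin charlas.length, (i : Nat) ≤ (j : Nat) →
        charlas[(j : Nat)].2 ≤ (PySem.List.pyGetD charlas posicion (0, 0)).1 →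
        charlas[(i : Nat)].2 ≤ (PySem.List.pyGetD charlas posicion (0, 0)).1) :
    ∃ K : Int, -1 ≤ K ∧ K < (charlas.length : Int) ∧
      (∀ (i : Nat) (h : i < charlas.length),
        (charlas[i].2 ≤ (PySem.List.pyGetD charlas posicion (0, 0)).1 ↔ (i : Int) ≤ K)) ∧
      posicion_no_conflictiva charlas posicion = (if 0 ≤ K ∧ K ≤ posicion - 1 then K else -1) ∧
      posicion_no_conflictiva_alt charlas posicion =
        (if posicion ≤ K then posicion - 1 else K) := by
  have hpn : posicion.toNat < charlas.length := by omega
  have hcp := PySem.List.pyGet?_eq_some_getElem (xs := charlas) (i := posicion) (by omega) hlen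
  have hgd : PySem.List.pyGetD charlas posicion (0, 0) = charlas[posicion.toNat]'hpn :=
    PySem.List.pyGetD_eq_getElem charlas (0, 0) (by omega) hlen
  obtain ⟨K, hK1, hK2, hc⟩ := pv_exists_K (PySem.List.pyGetD charlas posicion (0, 0)).1 charlas
    (by intro i j hi hj hij hjt; exact hprefix ⟨i, hi⟩ ⟨j, hj⟩ hij hjt)
  refine ⟨K, hK1, hK2, hc, ?_, ?_⟩
  · have hA := pv_loop_spec charlas posicion (charlas[posicion.toNat]'hpn) K hlen hcp hK1 hK2
      (by intro i h; rw [hgd] at hc; exact hc i h)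
      (posicion - 1 + 1 - 0).toNat 0 (posicion - 1) (by omega) (by omega) (by omega) (by omega)
      (by omega)
    unfold posicion_no_conflictiva
    rw [hA]
  · unfold posicion_no_conflictiva_alt
    rw [if_neg hp0, hcp]
    have hcast : ((posicion.toNat : Int)) = posicion := by omega
    have hfold := pv_range_fold charlas (charlas[posicion.toNat]'hpn).1 K hK1
      (by intro i h; rw [hgd] at hc; exact hc i h) posicion.toNat (by omega)
    rw [hcast] at hfold
    dsimp only
    rw [hfold]

-- ===== VERDICT (by name: the statements are the Claim_ definitions above) =====
theorem posicion_no_conflictiva_spec : Claim_unchanged_posicion_no_conflictiva := by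
  intro charlas posicion _hdom hpre hnD
  show posicion_no_conflictiva charlas posicion = posicion_no_conflictiva_alt charlas posicion
  by_cases hp0 : posicion ≤ 0
  · unfold posicion_no_conflictiva posicion_no_conflictiva_alt
    rw [pvALoop, dif_neg (by omega)]
    simp [hp0]
  · obtain ⟨hlen, hprefix⟩ : posicion < (charlas.length : Int) ∧ _ := by
      rcases hpre with h | h
      · omega
      · exact h
    obtain ⟨K, hK1, hK2, hc, hA, hB⟩ := pv_both_values charlas posicion hp0 hlen hprefix
    have hKp : ¬ posicion ≤ K := by
      intro hKp
      apply hnD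
      refine ⟨by omega, hlen, ?_⟩
      have hpn : posicion.toNat < charlas.length := by omega
      have hgd : PySem.List.pyGetD charlas posicion (0, 0) = charlas[posicion.toNat]'hpn :=
        PySem.List.pyGetD_eq_getElem charlas (0, 0) (by omega) hlen
      rw [List.getD_eq_getElem charlas (0, 0) hpn]
      rw [hgd] at hc
      exact (hc posicion.toNat hpn).mpr (by omega)
    rw [hA, hB, if_neg hKp]
    split_ifs with g <;> omega

theorem posicion_no_conflictiva_changed : Claim_changed_posicion_no_conflictiva := by
  unfold Claim_changed_posicion_no_conflictiva
  refine ⟨by decide, by decide, by decide, ?_, by decide, by decide⟩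
  show posicion_no_conflictiva [(0, 1), (2, 2)] 1 = -1
  unfold posicion_no_conflictiva
  rw [pvALoop]
  norm_num [PySem.List.pyGet?, PySem.List.pyIdx?, PySem.Int.floordiv]
  rw [pvALoop]
  norm_num

theorem posicion_no_conflictiva_tight : Claim_exact_posicion_no_conflictiva := by
  intro charlas posicion _hdom hpre hD
  obtain ⟨hp1, hlen, hdeg⟩ := hD
  have hp0 : ¬ posicion ≤ 0 := by omega
  rcases hpre with h | h
  · exact absurd h hp0
  obtain ⟨K, hK1, hK2, hc, hA, hB⟩ := pv_both_values charlas posicion hp0 hlen h.2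
  have hpn : posicion.toNat < charlas.length := by omega
  have hgd : PySem.List.pyGetD charlas posicion (0, 0) = charlas[posicion.toNat]'hpn :=
    PySem.List.pyGetD_eq_getElem charlas (0, 0) (by omega) hlen
  rw [List.getD_eq_getElem charlas (0, 0) hpn] at hdeg
  have hKp' : (posicion.toNat : Int) ≤ K := (hc posicion.toNat hpn).mp (by rw [hgd]; exact hdeg)
  have hKp : posicion ≤ K := by omega
  rw [hA, hB, if_pos hKp, if_neg (by omega)]
  omega
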